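-- pv_equiv track=rewrite | github.com/seongdeokKim/ner | utils/data_loader.py | transform_bio_to_ngram
-- ===== SOURCE A (Python) =====
-- def transform_bio_to_ngram(bio_pred_tags,
--                            bio_tokens):
--     """
--     convert bio format (BIO scheme) to n-gram format
--
--     Args:
--         bio_pred_tags:
--         bio_tokens:
--
--     Returns:
--         ngram_pred_tags:
--         ngram_tokens:
--     """
--
--     # Get tokens that are tagged as "B" of "I", not as "O"
--     bi_pred_tags, bi_tokens = [], []
--     for bio_pred_tags_per_sent, bio_tokens_per_sent in zip(bio_pred_tags, bio_tokens):
--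
--         bi_pred_tags_per_sent, bi_tokens_per_sent = [], []
--         for bio_pred_tag, bio_token in zip(bio_pred_tags_per_sent, bio_tokens_per_sent):
--             if bio_pred_tag != "O" and bio_pred_tag != "PAD":
--                 bi_pred_tags_per_sent.append(bio_pred_tag)
--                 bi_tokens_per_sent.append(bio_token)
--
--         bi_pred_tags.append(bi_pred_tags_per_sent)
--         bi_tokens.append(bi_tokens_per_sent)
--
--     # Get the position of token tagged as "B-"
--     b_tag_start_positions = []
--     for bi_pred_tags_per_sent in bi_pred_tags:
--
--         b_tag_start_positions_per_sent = []
--         for position, bi_pred_per_token in enumerate(bi_pred_tags_per_sent):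
--             if bi_pred_per_token.startswith('B'):
--                 b_tag_start_positions_per_sent.append(position)
--
--         b_tag_start_positions.append(b_tag_start_positions_per_sent)
--
--     # combine bio tokens that are sequentially tagged as B-tag I-tags into a unified ngram
--     ngram_pred_tags, ngram_tokens = [], []
--     for i in range(len(bi_pred_tags)):
--         bi_pred_tags_per_sent = bi_pred_tags[i]
--         bi_tokens_per_sent = bi_tokens[i]
--         b_tag_start_positions_per_sent = b_tag_start_positions[i]
--
--         ngram_preds_per_sent, ngram_tokens_per_sent = [], []
--         for j in range(len(bi_pred_tags_per_sent)):
--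
--             if j < (len(b_tag_start_positions_per_sent) - 1):
--                 try:
--                     s_idx = b_tag_start_positions_per_sent[j]
--                     e_idx = b_tag_start_positions_per_sent[j+1]
--
--                     ngram_tag = bi_pred_tags_per_sent[s_idx][2:]
--                     ngram_token = '_'.join(bi_tokens_per_sent[s_idx:e_idx])
--                 except:
--                     ngram_tag = "O"
--                     ngram_token = "<UnKnown>"
--
--                 ngram_preds_per_sent.append(ngram_tag)
--                 ngram_tokens_per_sent.append(ngram_token)
--
--             elif j == (len(b_tag_start_positions_per_sent) - 1):
--                 try:
--                     s_idx = b_tag_start_positions_per_sent[j]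
--
--                     ngram_tag = bi_pred_tags_per_sent[s_idx][2:]
--                     ngram_token = '_'.join(bi_tokens_per_sent[s_idx:])
--                 except:
--                     ngram_tag = "O"
--                     ngram_token = "<UnKnown>"
--
--                 ngram_preds_per_sent.append(ngram_tag)
--                 ngram_tokens_per_sent.append(ngram_token)
--                 break
--
--             else:
--                 break
--
--         ngram_pred_tags.append(ngram_preds_per_sent)
--         ngram_tokens.append(ngram_tokens_per_sent)
--
--     return ngram_pred_tags, ngram_tokens
-- ===== SOURCE B (Python) =====
-- def transform_bio_to_ngram(bio_pred_tags, bio_tokens):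
--     """convert bio format (BIO scheme) to n-gram format: one streaming pass per
--     sentence, merging each B-tag with its following I-tokens."""
--     ngram_pred_tags, ngram_tokens = [], []
--     for tags_sent, toks_sent in zip(bio_pred_tags, bio_tokens):
--         preds_out, toks_out = [], []
--         cur_tag, cur_toks = None, []
--         for tag, tok in zip(tags_sent, toks_sent):
--             if tag == "O" or tag == "PAD":
--                 continue
--             if tag.startswith('B'):
--                 if cur_tag is not None:
--                     preds_out.append(cur_tag[2:])
--                     toks_out.append('_'.join(cur_toks))
--                 cur_tag, cur_toks = tag, [tok]
--             elif cur_tag is not None: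
--                 cur_toks.append(tok)
--         if cur_tag is not None:
--             preds_out.append(cur_tag[2:])
--             toks_out.append('_'.join(cur_toks))
--         ngram_pred_tags.append(preds_out)
--         ngram_tokens.append(toks_out)
--     return ngram_pred_tags, ngram_tokens
-- ===== Notes on version B (the rewrite author's own statement) =====
-- stated objective: simpler
-- what changed: Replaces A's three sequential passes (filter out O/PAD, build an index of B-tag positions, then slice between consecutive positions inside a range loop with breaks and try/except) by a single streaming pass per sentence that maintains the currently open segment and flushes it at each new B tag and at sentence end.
import Mathlib
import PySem

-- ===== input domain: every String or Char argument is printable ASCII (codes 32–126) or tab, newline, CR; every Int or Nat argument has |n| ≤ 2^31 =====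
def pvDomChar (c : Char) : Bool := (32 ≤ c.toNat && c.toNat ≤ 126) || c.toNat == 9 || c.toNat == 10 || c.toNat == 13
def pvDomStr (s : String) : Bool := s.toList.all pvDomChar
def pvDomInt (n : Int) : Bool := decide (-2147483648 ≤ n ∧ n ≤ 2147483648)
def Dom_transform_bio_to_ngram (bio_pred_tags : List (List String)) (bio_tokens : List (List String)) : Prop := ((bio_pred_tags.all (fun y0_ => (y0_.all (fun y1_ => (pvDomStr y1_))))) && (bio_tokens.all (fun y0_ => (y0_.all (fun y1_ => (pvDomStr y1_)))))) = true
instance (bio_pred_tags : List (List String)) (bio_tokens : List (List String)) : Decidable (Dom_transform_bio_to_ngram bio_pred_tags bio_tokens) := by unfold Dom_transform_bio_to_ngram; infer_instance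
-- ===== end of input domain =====

-- B replaces A's three passes (filter, B-position index, position-pair slicing) by one
-- streaming pass per sentence that flushes an open segment at each B tag; objective: simpler.

-- ===== PORT A =====
-- A's pass-2 inner loop: 'for position, tag in enumerate(...): if tag.startswith("B"): append(position)'
def pvA_bposLoop : List String → Nat → List Nat → List Nat
  | [], _, acc => acc
  | t :: rest, pos, acc =>
      pvA_bposLoop rest (pos + 1) (if PySem.Str.startswith t "B" then acc ++ [pos] else acc)

-- A's pass-3 inner 'for j in range(len(...))' loop with its two breaks; the try/except
-- bodies become matches on the Option-returning index lookups (none = IndexError, which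
-- the except turns into ("O", "<UnKnown>")).
def pvA_jloop (biT biK : List String) (bp : List Nat) (j : Nat) (acc : List String × List String) :
    List String × List String :=
  if _h : j < biT.length then
    if (j : Int) < (bp.length : Int) - 1 then
      let r : String × String :=
        match bp[j]?, bp[j+1]? with
        | some s, some e =>
          (match biT[s]? with
           | some t => (PySem.Str.slice t (some 2) none,
                        PySem.Str.join "_" (PySem.List.slice biK (some (s : Int)) (some (e : Int))))
           | none => ("O", "<UnKnown>"))
        | _, _ => ("O", "<UnKnown>")
      pvA_jloop biT biK bp (j+1) (acc.1 ++ [r.1], acc.2 ++ [r.2])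
    else if (j : Int) = (bp.length : Int) - 1 then
      let r : String × String :=
        match bp[j]? with
        | some s =>
          (match biT[s]? with
           | some t => (PySem.Str.slice t (some 2) none,
                        PySem.Str.join "_" (PySem.List.slice biK (some (s : Int)) none))
           | none => ("O", "<UnKnown>"))
        | none => ("O", "<UnKnown>")
      (acc.1 ++ [r.1], acc.2 ++ [r.2])
    else acc
  else acc
termination_by biT.length - j

-- 'l.getD i []' in pass 3 renders the Python 'l[i]' exactly: 0 ≤ i < len(l) always holds there.
def transform_bio_to_ngram (bio_pred_tags : List (List String)) (bio_tokens : List (List String)) :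
    List (List String) × List (List String) :=
  let bi : List (List String) × List (List String) :=
    (bio_pred_tags.zip bio_tokens).foldl (fun acc sent =>
      let bisent :=
        (sent.1.zip sent.2).foldl (fun acc2 p =>
          if p.1 != "O" && p.1 != "PAD" then (acc2.1 ++ [p.1], acc2.2 ++ [p.2]) else acc2)
          ([], [])
      (acc.1 ++ [bisent.1], acc.2 ++ [bisent.2])) ([], [])
  let bposs : List (List Nat) :=
    bi.1.foldl (fun acc sentTags => acc ++ [pvA_bposLoop sentTags 0 []]) []
  (List.range bi.1.length).foldl (fun acc i =>
      let r := pvA_jloop (bi.1.getD i []) (bi.2.getD i []) (bposs.getD i []) 0 ([], [])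
      (acc.1 ++ [r.1], acc.2 ++ [r.2])) ([], [])

-- ===== PORT B =====
-- B's single pass per sentence: skip O/PAD, open a segment at each B tag (flushing the
-- previous one), extend the open segment on other kept tags, flush at sentence end.
def pvB_sentLoop : List (String × String) → Option String → List String →
    (List String × List String) → (List String × List String)
  | [], cur, curToks, acc =>
      match cur with
      | some t => (acc.1 ++ [PySem.Str.slice t (some 2) none],
                   acc.2 ++ [PySem.Str.join "_" curToks])
      | none => acc
  | (tag, tok) :: rest, cur, curToks, acc =>
      if tag == "O" || tag == "PAD" then pvB_sentLoop rest cur curToks acc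
      else if PySem.Str.startswith tag "B" then
        match cur with
        | some t => pvB_sentLoop rest (some tag) [tok]
            (acc.1 ++ [PySem.Str.slice t (some 2) none],
             acc.2 ++ [PySem.Str.join "_" curToks])
        | none => pvB_sentLoop rest (some tag) [tok] acc
      else
        match cur with
        | some _ => pvB_sentLoop rest cur (curToks ++ [tok]) acc
        | none => pvB_sentLoop rest cur curToks acc
def transform_bio_to_ngram_alt (bio_pred_tags : List (List String)) (bio_tokens : List (List String)) :
    List (List String) × List (List String) :=
  (bio_pred_tags.zip bio_tokens).foldl (fun acc sent =>
      let r := pvB_sentLoop (sent.1.zip sent.2) none [] ([], [])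
      (acc.1 ++ [r.1], acc.2 ++ [r.2])) ([], [])

-- ===== PRECONDITION & SPEC =====
def Spec_transform_bio_to_ngram (bio_pred_tags : List (List String)) (bio_tokens : List (List String)) (out : List (List String) × List (List String)) : Prop := out = transform_bio_to_ngram_alt bio_pred_tags bio_tokens
instance (bio_pred_tags : List (List String)) (bio_tokens : List (List String)) (out : List (List String) × List (List String)) : Decidable (Spec_transform_bio_to_ngram bio_pred_tags bio_tokens out) := by unfold Spec_transform_bio_to_ngram; infer_instance

-- ===== CLAIM (what is proved, stated in full; the proofs are below) =====
def Claim_equal_transform_bio_to_ngram : Prop := ∀ (bio_pred_tags : List (List String)) (bio_tokens : List (List String)), Dom_transform_bio_to_ngram bio_pred_tags bio_tokens → Spec_transform_bio_to_ngram bio_pred_tags bio_tokens (transform_bio_to_ngram bio_pred_tags bio_tokens)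

-- ===== LEMMAS AND PROOFS =====

-- vocabulary of the proofs
def pvKeep (p : String × String) : Bool := p.1 != "O" && p.1 != "PAD"
def pvNotB (p : String × String) : Bool := !(PySem.Str.startswith p.1 "B")
def pvBposS : List String → Nat → List Nat
  | [], _ => []
  | t :: rest, pos =>
      if PySem.Str.startswith t "B" then pos :: pvBposS rest (pos + 1) else pvBposS rest (pos + 1)

-- the segmentation both programs compute: each segment is a B tag with its following tokens
def pvSegs : List (String × String) → List (String × List String)
  | [] => []
  | p :: r =>
    if PySem.Str.startswith p.1 "B" then
      (p.1, p.2 :: (r.takeWhile pvNotB).map Prod.snd) :: pvSegs (r.dropWhile pvNotB)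
    else pvSegs r
termination_by l => l.length
decreasing_by
  · simpa using Nat.lt_succ_of_le (List.length_dropWhile_le _ _)
  · simp
def pvSegOut (s : String × List String) : String × String :=
  (PySem.Str.slice s.1 (some 2) none, PySem.Str.join "_" s.2)

-- what A's j-loop emits, read off a list of consecutive B positions
def pvAOuts (biT biK : List String) : List Nat → List (String × String)
  | [] => []
  | s :: rest =>
     match biT[s]? with
     | none => ("O", "<UnKnown>") :: pvAOuts biT biK rest
     | some t =>
       (PySem.Str.slice t (some 2) none,
        PySem.Str.join "_" (match rest.head? with
           | some e => (biK.drop s).take (e - s)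
           | none => biK.drop s)) :: pvAOuts biT biK rest

lemma pvA_bposLoop_eq : ∀ (l : List String) (pos : Nat) (acc : List Nat),
    pvA_bposLoop l pos acc = acc ++ pvBposS l pos := by
  intro l
  induction l with
  | nil => intro pos acc; simp [pvA_bposLoop, pvBposS]
  | cons t rest ih =>
    intro pos acc
    cases h : PySem.Chars.startswith t.toList ['B'] <;>
      simp [pvA_bposLoop, pvBposS, h, ih]

lemma pvBposS_succ : ∀ (l : List String) (p : Nat),
    pvBposS l (p + 1) = (pvBposS l p).map (· + 1) := by
  intro l
  induction l with
  | nil => intro p; simp [pvBposS]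
  | cons t rest ih =>
    intro p
    cases h : PySem.Chars.startswith t.toList ['B'] <;>
      simp [pvBposS, h, ih (p+1)]

lemma pvBposS_length_le : ∀ (l : List String) (p : Nat), (pvBposS l p).length ≤ l.length := by
  intro l
  induction l with
  | nil => intro p; simp [pvBposS]
  | cons t rest ih =>
    intro p
    cases h : PySem.Chars.startswith t.toList ['B'] <;>
      simp [pvBposS, h] <;> exact Nat.le_trans (ih _) (by omega)

lemma pvTakeWhile_of_bpos_nil : ∀ r : List (String × String),
    pvBposS (r.map Prod.fst) 0 = [] → r.takeWhile pvNotB = r := by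
  intro r
  induction r with
  | nil => intro _; rfl
  | cons q rest ih =>
    intro h
    simp only [List.map_cons, pvBposS] at h
    cases hb : PySem.Chars.startswith q.1.toList ['B']
    · rw [pvBposS_succ] at h
      simp [hb] at h
      simp [pvNotB, hb, ih h]
    · simp [hb] at h

lemma pvTakeWhile_of_bpos_cons : ∀ (r : List (String × String)) (e : Nat) (es : List Nat),
    pvBposS (r.map Prod.fst) 0 = e :: es → r.takeWhile pvNotB = r.take e := by
  intro r
  induction r with
  | nil => intro e es h; simp [pvBposS] at h
  | cons q rest ih =>
    intro e es h
    simp only [List.map_cons, pvBposS] at h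
    cases hb : PySem.Chars.startswith q.1.toList ['B']
    · simp [pvBposS_succ, hb] at h
      rcases hr : pvBposS (rest.map Prod.fst) 0 with _ | ⟨e0, es0⟩
      · rw [hr] at h; simp at h
      · rw [hr] at h; simp at h
        obtain ⟨he, -⟩ := h
        simp [pvNotB, hb, ih e0 es0 hr, ← he]
    · simp [hb] at h
      obtain ⟨he, -⟩ := h
      subst he
      simp [pvNotB, hb]

lemma pvSegs_dropWhile : ∀ l : List (String × String),
    pvSegs (l.dropWhile pvNotB) = pvSegs l := by
  intro l
  induction l with
  | nil => rfl
  | cons p r ih =>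
    cases hb : PySem.Chars.startswith p.1.toList ['B']
    · rw [List.dropWhile_cons_of_pos (by simp [pvNotB, hb])]
      rw [ih]
      rw [pvSegs]
      simp [hb]
    · rw [List.dropWhile_cons_of_neg (by simp [pvNotB, hb])]

lemma pvAOuts_shift (t0 k0 : String) : ∀ (bp : List Nat) (biT biK : List String),
    pvAOuts (t0 :: biT) (k0 :: biK) (bp.map (· + 1)) = pvAOuts biT biK bp := by
  intro bp
  induction bp with
  | nil => intro biT biK; rfl
  | cons s rest ih =>
    intro biT biK
    simp only [List.map_cons, pvAOuts, List.getElem?_cons_succ]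
    cases hT : biT[s]? with
    | none => simp [ih]
    | some t =>
      simp only [ih]
      congr 1
      cases rest with
      | nil => simp
      | cons e es => simp [Nat.succ_sub_succ]

lemma pvAOuts_eq_segs : ∀ l : List (String × String),
    pvAOuts (l.map Prod.fst) (l.map Prod.snd) (pvBposS (l.map Prod.fst) 0)
      = (pvSegs l).map pvSegOut := by
  intro l
  induction l with
  | nil => simp [pvAOuts, pvBposS, pvSegs]
  | cons p r ih =>
    simp only [List.map_cons, pvBposS]
    cases hb : PySem.Chars.startswith p.1.toList ['B']
    · rw [if_neg (by simp [hb]), pvBposS_succ, pvAOuts_shift, ih]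
      have hseg : pvSegs (p :: r) = pvSegs r := by rw [pvSegs]; simp [hb]
      rw [hseg]
    · rw [if_pos (by simp [hb]), pvBposS_succ]
      have hseg : pvSegs (p :: r)
          = (p.1, p.2 :: (r.takeWhile pvNotB).map Prod.snd) :: pvSegs (r.dropWhile pvNotB) := by
        rw [pvSegs]; simp [hb]
      rw [hseg]
      simp only [pvAOuts, List.getElem?_cons_zero, List.map_cons]
      rw [pvAOuts_shift, ih, pvSegs_dropWhile]
      congr 2
      rcases hr : pvBposS (r.map Prod.fst) 0 with _ | ⟨e0, es0⟩
      · simp [pvTakeWhile_of_bpos_nil r hr]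
      · rw [pvTakeWhile_of_bpos_cons r e0 es0 hr]
        simp [List.map_take]

lemma pvA_jloop_eq : ∀ (m : Nat) (biT biK : List String) (bp : List Nat)
    (_hn : bp.length ≤ biT.length) (j : Nat) (acc : List String × List String),
    bp.length - j ≤ m → j ≤ bp.length →
    pvA_jloop biT biK bp j acc
      = (acc.1 ++ (pvAOuts biT biK (bp.drop j)).map Prod.fst,
         acc.2 ++ (pvAOuts biT biK (bp.drop j)).map Prod.snd) := by
  intro m
  induction m with
  | zero =>
    intro biT biK bp hn j acc hm hj
    have hj' : j = bp.length := by omega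
    subst hj'
    rw [List.drop_of_length_le (le_refl _)]
    rw [pvA_jloop]
    by_cases hlen : bp.length < biT.length
    · rw [dif_pos hlen, if_neg (by omega), if_neg (by omega)]
      simp [pvAOuts]
    · rw [dif_neg hlen]
      simp [pvAOuts]
  | succ m ih =>
    intro biT biK bp hn j acc hm hj
    by_cases hjn : j < bp.length
    · have hlt : j < biT.length := lt_of_lt_of_le hjn hn
      have hdrop : bp.drop j = bp[j] :: bp.drop (j+1) := List.drop_eq_getElem_cons hjn
      rw [pvA_jloop, dif_pos hlt]
      by_cases hpair : j + 1 < bp.length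
      · rw [if_pos (by omega)]
        rw [ih biT biK bp hn (j+1) _ (by omega) (by omega)]
        rw [hdrop]
        have hdrop2 : bp.drop (j+1) = bp[j+1] :: bp.drop (j+2) := List.drop_eq_getElem_cons hpair
        simp only [pvAOuts, List.getElem?_eq_getElem hjn, List.getElem?_eq_getElem hpair, hdrop2,
          List.head?_cons]
        cases hT : biT[bp[j]]? with
        | none => simp
        | some t =>
          rw [PySem.List.slice_natCast]
          simp
      · rw [if_neg (by omega), if_pos (by omega)]
        have hjlast : j + 1 = bp.length := by omega
        have hdropnil : bp.drop (j+1) = [] := List.drop_of_length_le (by omega)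
        rw [hdrop, hdropnil]
        simp only [pvAOuts, List.getElem?_eq_getElem hjn, List.head?_nil]
        cases hT : biT[bp[j]]? with
        | none => simp
        | some t =>
          rw [PySem.List.slice_from_natCast]
          simp
    · have hj' : j = bp.length := by omega
      subst hj'
      rw [List.drop_of_length_le (le_refl _)]
      rw [pvA_jloop]
      by_cases hlen : bp.length < biT.length
      · rw [dif_pos hlen, if_neg (by omega), if_neg (by omega)]
        simp [pvAOuts]
      · rw [dif_neg hlen]
        simp [pvAOuts]

lemma pvB_filter : ∀ (l : List (String × String)) (cur : Option String)
    (curToks : List String) (acc : List String × List String),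
    pvB_sentLoop l cur curToks acc = pvB_sentLoop (l.filter pvKeep) cur curToks acc := by
  intro l
  induction l with
  | nil => intro cur curToks acc; rfl
  | cons p rest ih =>
    intro cur curToks acc
    obtain ⟨tag, tok⟩ := p
    by_cases hsk : (tag == "O" || tag == "PAD") = true
    · have hk : pvKeep (tag, tok) = false := by
        revert hsk; simp [pvKeep]; tauto
      rw [List.filter_cons_of_neg (by simp [hk])]
      simp only [pvB_sentLoop, hsk, if_true]
      exact ih cur curToks acc
    · have hk : pvKeep (tag, tok) = true := by
        revert hsk; simp [pvKeep]
      rw [List.filter_cons_of_pos hk]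
      simp only [pvB_sentLoop, hsk, Bool.false_eq_true, if_false]
      split <;> (try split) <;> apply ih

lemma pvB_open : ∀ (l : List (String × String)), (∀ p ∈ l, pvKeep p = true) →
    ∀ (t : String) (curToks : List String) (acc : List String × List String),
    pvB_sentLoop l (some t) curToks acc
      = pvB_sentLoop (l.dropWhile pvNotB) none []
          (acc.1 ++ [PySem.Str.slice t (some 2) none],
           acc.2 ++ [PySem.Str.join "_" (curToks ++ (l.takeWhile pvNotB).map Prod.snd)]) := by
  intro l
  induction l with
  | nil =>
    intro _ t curToks acc
    simp [pvB_sentLoop]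
  | cons p rest ih =>
    intro hkeep t curToks acc
    obtain ⟨tag, tok⟩ := p
    have hk : pvKeep (tag, tok) = true := hkeep _ (List.mem_cons_self ..)
    have hsk : (tag == "O" || tag == "PAD") = false := by
      revert hk; simp [pvKeep]
    cases hb : PySem.Chars.startswith tag.toList ['B']
    · -- not a B tag: extend the open segment
      rw [List.dropWhile_cons_of_pos (by simp [pvNotB, hb]),
          List.takeWhile_cons_of_pos (by simp [pvNotB, hb])]
      simp only [pvB_sentLoop, hsk, Bool.false_eq_true, if_false]
      rw [if_neg (by simp [hb])]
      rw [ih (fun q hq => hkeep q (List.mem_cons_of_mem _ hq)) t (curToks ++ [tok]) acc]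
      simp
    · -- a B tag: flush, then the two sides coincide after one unfolding step
      rw [List.dropWhile_cons_of_neg (by simp [pvNotB, hb]),
          List.takeWhile_cons_of_neg (by simp [pvNotB, hb])]
      simp only [pvB_sentLoop, hsk, Bool.false_eq_true, if_false]
      rw [if_pos (by simp [hb]), if_pos (by simp [hb])]
      simp

lemma pvB_closed : ∀ (n : Nat) (l : List (String × String)), l.length ≤ n →
    (∀ p ∈ l, pvKeep p = true) → ∀ acc : List String × List String,
    pvB_sentLoop l none [] acc
      = (acc.1 ++ ((pvSegs l).map pvSegOut).map Prod.fst,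
         acc.2 ++ ((pvSegs l).map pvSegOut).map Prod.snd) := by
  intro n
  induction n with
  | zero =>
    intro l hl _ acc
    have : l = [] := List.eq_nil_of_length_eq_zero (by omega)
    subst this
    simp [pvB_sentLoop, pvSegs]
  | succ n ih =>
    intro l hl hkeep acc
    cases l with
    | nil => simp [pvB_sentLoop, pvSegs]
    | cons p rest =>
      obtain ⟨tag, tok⟩ := p
      have hk : pvKeep (tag, tok) = true := hkeep _ (List.mem_cons_self ..)
      have hsk : (tag == "O" || tag == "PAD") = false := by
        revert hk; simp [pvKeep]
      cases hb : PySem.Chars.startswith tag.toList ['B']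
      · -- not B, nothing open: skip
        simp only [pvB_sentLoop, hsk, Bool.false_eq_true, if_false]
        rw [if_neg (by simp [hb])]
        rw [ih rest (by simpa using hl) (fun q hq => hkeep q (List.mem_cons_of_mem _ hq)) acc]
        have hseg : pvSegs ((tag, tok) :: rest) = pvSegs rest := by rw [pvSegs]; simp [hb]
        rw [hseg]
      · -- B: open a segment, then close it with pvB_open
        simp only [pvB_sentLoop, hsk, Bool.false_eq_true, if_false]
        rw [if_pos (by simp [hb])]
        rw [pvB_open rest (fun q hq => hkeep q (List.mem_cons_of_mem _ hq)) tag [tok] acc]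
        rw [ih (rest.dropWhile pvNotB)
              (Nat.le_trans (List.length_dropWhile_le _ _) (by simpa using hl))
              (fun q hq => hkeep q (List.mem_cons_of_mem _ ((List.dropWhile_sublist _).mem hq))) _]
        have hseg : pvSegs ((tag, tok) :: rest)
            = (tag, tok :: (rest.takeWhile pvNotB).map Prod.snd) :: pvSegs (rest.dropWhile pvNotB) := by
          rw [pvSegs]; simp [hb]
        rw [hseg]
        simp [pvSegOut]

lemma pvSent_eq (zp : List (String × String)) :
    pvA_jloop ((zp.filter pvKeep).map Prod.fst) ((zp.filter pvKeep).map Prod.snd)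
        (pvBposS ((zp.filter pvKeep).map Prod.fst) 0) 0 ([], [])
      = pvB_sentLoop zp none [] ([], []) := by
  rw [pvA_jloop_eq (pvBposS ((zp.filter pvKeep).map Prod.fst) 0).length _ _ _
        ((pvBposS_length_le ((zp.filter pvKeep).map Prod.fst) 0).trans (by simp))
        0 ([], []) (by omega) (by omega)]
  rw [pvB_filter zp none [] ([], [])]
  rw [pvB_closed (zp.filter pvKeep).length _ (le_refl _) (fun q hq => List.of_mem_filter hq) _]
  simp [pvAOuts_eq_segs]

lemma pvFoldl_pair_append {α β γ : Type} (h1 : α → β) (h2 : α → γ) :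
    ∀ (s : List α) (acc : List β × List γ),
    s.foldl (fun acc x => (acc.1 ++ [h1 x], acc.2 ++ [h2 x])) acc
      = (acc.1 ++ s.map h1, acc.2 ++ s.map h2) := by
  intro s
  induction s with
  | nil => intro acc; simp
  | cons x rest ih => intro acc; simp [List.foldl_cons, ih]

lemma pvPass1_inner : ∀ (zp : List (String × String)) (acc : List String × List String),
    zp.foldl (fun acc2 p =>
        if p.1 != "O" && p.1 != "PAD" then (acc2.1 ++ [p.1], acc2.2 ++ [p.2]) else acc2) acc
      = (acc.1 ++ (zp.filter pvKeep).map Prod.fst, acc.2 ++ (zp.filter pvKeep).map Prod.snd) := by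
  intro zp
  induction zp with
  | nil => intro acc; simp
  | cons p rest ih =>
    intro acc
    simp only [List.foldl_cons]
    rw [show (p.1 != "O" && p.1 != "PAD") = pvKeep p from rfl]
    cases hk : pvKeep p
    · rw [List.filter_cons_of_neg (by simp [hk])]
      simp only [Bool.false_eq_true, if_false]
      exact ih acc
    · rw [List.filter_cons_of_pos hk]
      simp only [if_true]
      rw [ih]
      simp

lemma pvRange_fold_getD3 {α β₁ β₂ β₃ γ : Type} (g1 : α → β₁) (g2 : α → β₂) (g3 : α → β₃)
    (d1 : β₁) (d2 : β₂) (d3 : β₃) (step : γ → β₁ → β₂ → β₃ → γ) :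
    ∀ (s : List α) (acc : γ),
    (List.range s.length).foldl
        (fun acc i => step acc ((s.map g1).getD i d1) ((s.map g2).getD i d2) ((s.map g3).getD i d3)) acc
      = s.foldl (fun acc x => step acc (g1 x) (g2 x) (g3 x)) acc := by
  intro s
  induction s with
  | nil => intro acc; simp
  | cons x rest ih =>
    intro acc
    rw [List.length_cons, List.range_succ_eq_map, List.foldl_cons, List.foldl_map]
    simpa using ih (step acc (g1 x) (g2 x) (g3 x))

theorem pv_main (T K : List (List String)) :
    transform_bio_to_ngram T K = transform_bio_to_ngram_alt T K := by
  unfold transform_bio_to_ngram transform_bio_to_ngram_alt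
  simp only []
  set sents := T.zip K with hsents
  set g1 : List String × List String → List String :=
    fun sent => ((sent.1.zip sent.2).filter pvKeep).map Prod.fst with hg1
  set g2 : List String × List String → List String :=
    fun sent => ((sent.1.zip sent.2).filter pvKeep).map Prod.snd with hg2
  have h1 : (sents.foldl (fun acc sent =>
      ((acc.1 ++ [((sent.1.zip sent.2).foldl (fun acc2 p =>
          if p.1 != "O" && p.1 != "PAD" then (acc2.1 ++ [p.1], acc2.2 ++ [p.2]) else acc2)
          ([], [])).1]), acc.2 ++ [((sent.1.zip sent.2).foldl (fun acc2 p =>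
          if p.1 != "O" && p.1 != "PAD" then (acc2.1 ++ [p.1], acc2.2 ++ [p.2]) else acc2)
          ([], [])).2])) ([], []))
      = (sents.map g1, sents.map g2) := by
    rw [PySem.List.foldl_congr_mem sents _
        (fun acc sent => (acc.1 ++ [g1 sent], acc.2 ++ [g2 sent])) ([], [])
        (fun acc sent _ => by rw [pvPass1_inner]; simp [hg1, hg2])]
    simpa using pvFoldl_pair_append g1 g2 sents ([], [])
  rw [h1]
  simp only []
  have h2 : ((sents.map g1).foldl (fun acc sentTags => acc ++ [pvA_bposLoop sentTags 0 []]) [])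
      = sents.map (fun sent => pvBposS (g1 sent) 0) := by
    rw [PySem.List.foldl_append_singleton_eq_map]
    simp only [List.map_map, List.nil_append]
    exact List.map_congr_left (fun sent _ => by simp [pvA_bposLoop_eq])
  rw [h2]
  rw [List.length_map]
  rw [pvRange_fold_getD3 g1 g2 (fun sent => pvBposS (g1 sent) 0) [] [] []
      (fun acc b1 b2 b3 => (acc.1 ++ [(pvA_jloop b1 b2 b3 0 ([], [])).1],
                            acc.2 ++ [(pvA_jloop b1 b2 b3 0 ([], [])).2])) sents ([], [])]
  exact PySem.List.foldl_congr_mem sents _ _ ([], [])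
    (fun acc sent _ => by
      simp only [hg1, hg2]
      rw [pvSent_eq (sent.1.zip sent.2)])

-- ===== VERDICT (by name: the statement is the Claim_ definition above) =====
theorem transform_bio_to_ngram_spec : Claim_equal_transform_bio_to_ngram := by
  intro bio_pred_tags bio_tokens _
  unfold Spec_transform_bio_to_ngram
  exact pv_main bio_pred_tags bio_tokens
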